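-- pv_equiv track=rewrite | github.com/Bachfischer/ml-playground | src/leetcode/microsoft/min-steps-to-make-piles-equal-height.py | make_piles_equal_height
-- ===== SOURCE A (Python) =====
-- def make_piles_equal_height(piles: list) -> int:
--
--     number_of_operations = 0
--
--     #sort list of piles in descending order
--     piles.sort(reverse=True)
--
--     max_element = piles[0]
--     i = 1
--     while i <= len(piles) -1:
--
--         if max_element != piles[i]:
--             piles[i-1] = piles[i]
--             number_of_operations += 1
--             i = 1
--             max_element = piles[0]
--         elif i == len(piles) - 1:
--             return number_of_operations
--         else:
--             i += 1
-- ===== SOURCE B (Python) =====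
-- def make_piles_equal_height(piles: list) -> int:
--     # Sort ascending once; one linear pass: each element's cost is the number of
--     # distinct values strictly below it, accumulated with a running distinct counter.
--     # (Note: unlike A, B does not mutate the caller's list; equivalence is about the return value.)
--     s = sorted(piles)
--     ops = 0
--     d = 0
--     for prev, cur in zip(s, s[1:]):
--         if cur != prev:
--             d += 1
--         ops += d
--     return ops
-- ===== Notes on version B (the rewrite author's own statement) =====
-- stated objective: faster
-- what changed: Replaces A's repeated rescan-and-overwrite passes over the descending-sorted list (one pass per operation) by one ascending sort plus a single linear pass that accumulates a running distinct-value counter.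
-- outside the precondition, e.g. on make_piles_equal_height([]): A raises IndexError, B returns 0; on make_piles_equal_height([0]): A returns None, B returns 0
import Mathlib
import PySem

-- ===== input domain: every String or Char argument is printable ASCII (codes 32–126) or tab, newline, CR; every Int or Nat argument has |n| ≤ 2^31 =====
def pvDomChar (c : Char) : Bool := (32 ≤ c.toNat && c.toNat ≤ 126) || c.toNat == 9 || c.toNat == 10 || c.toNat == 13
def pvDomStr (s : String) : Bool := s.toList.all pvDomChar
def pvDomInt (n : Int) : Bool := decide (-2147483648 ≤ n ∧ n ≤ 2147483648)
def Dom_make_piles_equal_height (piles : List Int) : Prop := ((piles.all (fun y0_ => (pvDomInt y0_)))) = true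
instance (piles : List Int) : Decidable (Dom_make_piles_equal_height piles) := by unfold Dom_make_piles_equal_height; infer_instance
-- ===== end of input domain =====

-- B replaces A's repeated rescan-and-overwrite passes over the descending-sorted list by one
-- ascending sort plus a single linear pass with a running distinct-value counter (measured faster;
-- equivalence is about the RETURN value only: A sorts/overwrites the caller's list in place, B does not).


-- ===== PORT A =====
-- A's while-loop; fuel is only a totality guard (proved sufficient below), each step is A's step:
-- read piles[i]; if max != piles[i]: piles[i-1] = piles[i]; ops += 1; i = 1; max = piles[0];
-- elif i == len-1: return ops; else: i += 1.  Falling off the while (only len <= 1) returns None in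
-- Python; that is outside Pre_ and the port returns 0 there.
def make_piles_equal_height_loop (fuel : Nat) (p : List Int) (maxEl : Int) (i : Nat) (ops : Int) : Int :=
  match fuel with
  | 0 => 0
  | fuel + 1 =>
    if (i : Int) ≤ (p.length : Int) - 1 then
      -- p.getD i 0 is piles[i], in range whenever the guard holds (0 ≤ i)
      if maxEl ≠ p.getD i 0 then
        -- piles[i-1] = piles[i]; ops += 1; i = 1; max = piles[0]
        make_piles_equal_height_loop fuel (p.set (i - 1) (p.getD i 0))
          ((p.set (i - 1) (p.getD i 0)).getD 0 0) 1 (ops + 1)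
      else if (i : Int) = (p.length : Int) - 1 then ops
      else make_piles_equal_height_loop fuel p maxEl (i + 1) ops
    else 0

def make_piles_equal_height (piles : List Int) : Int :=
  let s := PySem.List.sorted piles (fun x => x) true
  match PySem.List.pyGet? s 0 with        -- piles[0]: IndexError on [], excluded by Pre_
  | none => 0
  | some m => make_piles_equal_height_loop ((s.length + 1) ^ 3) s m 1 0

-- ===== PORT B =====
def make_piles_equal_height_altStep (st : Int × Int) (pc : Int × Int) : Int × Int :=
  let d := if pc.2 ≠ pc.1 then st.2 + 1 else st.2
  (st.1 + d, d)

def make_piles_equal_height_alt (piles : List Int) : Int :=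
  let s := PySem.List.sorted piles (fun x => x) false
  ((s.zip (PySem.List.slice s (some 1) none)).foldl make_piles_equal_height_altStep (0, 0)).1

-- ===== PRECONDITION & SPEC =====
-- Pre_ excludes lists of length < 2: on [] A raises IndexError at piles[0], and on a singleton A
-- falls off the while-loop and returns None, which is not an int.
def Pre_make_piles_equal_height (piles : List Int) : Prop := 2 ≤ piles.length
instance (piles : List Int) : Decidable (Pre_make_piles_equal_height piles) := by unfold Pre_make_piles_equal_height; infer_instance
def pvWitness_make_piles_equal_height : List Int := [1, 3, 2, 3]

def Spec_make_piles_equal_height (piles : List Int) (out : Int) : Prop := out = make_piles_equal_height_alt piles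
instance (piles : List Int) (out : Int) : Decidable (Spec_make_piles_equal_height piles out) := by unfold Spec_make_piles_equal_height; infer_instance

-- ===== CLAIM (what is proved, stated in full; the proofs are below) =====
def Claim_equal_make_piles_equal_height : Prop := ∀ (piles : List Int), Dom_make_piles_equal_height piles → Pre_make_piles_equal_height piles → Spec_make_piles_equal_height piles (make_piles_equal_height piles)

-- ===== LEMMAS AND PROOFS =====

-- pvNb l = number of adjacent distinct pairs in l; pvNbSum l = Σ over suffixes of pvNb.
-- For the descending-sorted list s, A's operation count is pvNbSum s: each element contributes
-- the number of distinct values strictly below it.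
def pvNb : List Int → Nat
  | [] => 0
  | [_] => 0
  | x :: y :: t => (if x = y then 0 else 1) + pvNb (y :: t)

def pvNbSum : List Int → Nat
  | [] => 0
  | x :: t => pvNb (x :: t) + pvNbSum t

theorem pvNb_le (l : List Int) : pvNb l ≤ l.length := by
  induction l using pvNb.induct with
  | case1 => simp [pvNb]
  | case2 a => simp [pvNb]
  | case3 x y t ih =>
    simp only [pvNb, List.length_cons] at *
    split_ifs <;> omega

theorem pvNbSum_le (l : List Int) : pvNbSum l ≤ l.length * l.length := by
  induction l with
  | nil => simp [pvNbSum]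
  | cons x t ih =>
    have h1 := pvNb_le (x :: t)
    simp only [pvNbSum, List.length_cons] at *
    nlinarith

theorem pvNb_replicate_cons (m x : Int) (t : List Int) :
    ∀ q, 1 ≤ q → pvNb (List.replicate q m ++ x :: t)
      = (if m = x then 0 else 1) + pvNb (x :: t) := by
  intro q
  induction q with
  | zero => omega
  | succ n ih =>
    intro _
    by_cases hn : 1 ≤ n
    · have : List.replicate (n + 1) m ++ x :: t = m :: (List.replicate n m ++ x :: t) := by
        simp [List.replicate_succ]
      rw [this]
      rcases n with _ | n'
      · omega
      · have : List.replicate (n' + 1) m ++ x :: t = m :: (List.replicate n' m ++ x :: t) := by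
          simp [List.replicate_succ]
        rw [this, pvNb, ← this, ih hn]
        simp
    · interval_cases n
      simp [pvNb]

theorem pvNbSum_replicate_cons (m x : Int) (t : List Int) :
    ∀ q, pvNbSum (List.replicate q m ++ x :: t)
      = q * ((if m = x then 0 else 1) + pvNb (x :: t)) + pvNbSum (x :: t) := by
  intro q
  induction q with
  | zero => simp
  | succ n ih =>
    have : List.replicate (n + 1) m ++ x :: t = m :: (List.replicate n m ++ x :: t) := by
      simp [List.replicate_succ]
    rw [this, pvNbSum, ih]
    rcases n with _ | n'
    · simp [pvNb]
    · rw [show m :: (List.replicate (n' + 1) m ++ x :: t) = List.replicate (n' + 1 + 1) m ++ x :: t by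
        simp [List.replicate_succ]]
      rw [pvNb_replicate_cons m x t (n' + 1 + 1) (by omega)]
      ring

theorem pvNbSum_replicate (q : Nat) (m : Int) : pvNbSum (List.replicate q m) = 0 := by
  induction q with
  | zero => simp [pvNbSum]
  | succ n ih =>
    rcases n with _ | n'
    · simp [pvNbSum, pvNb]
    · have h : List.replicate (n' + 1 + 1) m = List.replicate (n' + 1) m ++ [m] := by
        simp [List.replicate_succ']
      have h2 : List.replicate (n' + 1) m ++ [m] = List.replicate (n' + 1) m ++ m :: ([] : List Int) := rfl
      rw [h, h2, pvNbSum_replicate_cons m m [] (n' + 1)] at *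
      simp [pvNb, pvNbSum]

theorem pvSet_replicate (m x : Int) (l : List Int) :
    ∀ i, 1 ≤ i → (List.replicate i m ++ l).set (i - 1) x = List.replicate (i - 1) m ++ x :: l := by
  intro i
  induction i generalizing l with
  | zero => omega
  | succ n ih =>
    intro _
    rcases n with _ | n'
    · simp [List.replicate_succ]
    · have : List.replicate (n' + 1 + 1) m ++ l = m :: (List.replicate (n' + 1) m ++ l) := by
        simp [List.replicate_succ]
      rw [this]
      have h1 : n' + 1 + 1 - 1 = (n' + 1 - 1) + 1 := by omega
      rw [h1, List.set_cons_succ, ih l (by omega)]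
      have : n' + 1 - 1 = n' := by omega
      simp [this, List.replicate_succ]

theorem pvGetD_replicate (m x : Int) (t : List Int) (i : Nat) :
    (List.replicate i m ++ x :: t).getD i 0 = x := by
  simp [List.getD]

-- the main loop invariant: from state (replicate i m ++ rest, m, i) with i ≥ 1 and rest ≠ [],
-- A's loop returns ops + pvNbSum of the current list, given enough fuel.
theorem pvLoop_eq : ∀ (fuel i : Nat) (m : Int) (rest : List Int) (ops : Int),
    1 ≤ i → rest ≠ [] →
    pvNbSum (List.replicate i m ++ rest) * (i + rest.length) + rest.length < fuel →
    make_piles_equal_height_loop fuel (List.replicate i m ++ rest) m i ops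
      = ops + pvNbSum (List.replicate i m ++ rest) := by
  intro fuel
  induction fuel with
  | zero => intro i m rest ops _ _ h; omega
  | succ n ih =>
    intro i m rest ops hi hrest hfuel
    rcases rest with _ | ⟨r, rest'⟩
    · exact absurd rfl hrest
    have hguard : ((i : Int) ≤ ((List.replicate i m ++ r :: rest').length : Int) - 1) := by
      simp only [List.length_append, List.length_replicate, List.length_cons]
      push_cast; omega
    have hget : (List.replicate i m ++ r :: rest').getD i 0 = r := pvGetD_replicate m r rest' i
    rw [make_piles_equal_height_loop, if_pos hguard, hget]
    by_cases hm : m = r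
    · -- piles[i] == max: advance or return
      rw [if_neg (by simp [hm])]
      by_cases hlast : rest' = []
      · subst hlast
        rw [if_pos (by
          simp only [List.length_append, List.length_replicate, List.length_cons,
            List.length_nil]
          push_cast; omega)]
        have : List.replicate i m ++ [r] = List.replicate (i + 1) m := by
          rw [hm]; simp [List.replicate_succ']
        rw [this, pvNbSum_replicate]
        simp
      · rw [if_neg (by
          simp only [List.length_append, List.length_replicate, List.length_cons]
          have := List.length_pos_iff.2 hlast
          push_cast; omega)]
        have hform : List.replicate i m ++ r :: rest' = List.replicate (i + 1) m ++ rest' := by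
          rw [← hm]; simp [List.replicate_succ']
        rw [hform]
        apply ih (i + 1) m rest' ops (by omega) hlast
        rw [hform] at hfuel
        simp only [List.length_cons] at hfuel
        have hL : (i + 1) + rest'.length = i + (rest'.length + 1) := by omega
        rw [hL]
        omega
    · -- piles[i] != max: one operation, restart scan
      rw [if_pos (by simp [hm])]
      rw [pvSet_replicate m r (r :: rest') i hi]
      have hNb : pvNb (r :: r :: rest') = pvNb (r :: rest') := by simp [pvNb]
      have hS : pvNbSum (r :: r :: rest') = pvNb (r :: rest') + pvNbSum (r :: rest') := by
        rw [pvNbSum, hNb]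
      by_cases hone : i = 1
      · -- i = 1: new max is the copied value r
        subst hone
        have hp' : List.replicate (1 - 1) m ++ r :: r :: rest' = List.replicate 1 r ++ r :: rest' := by
          simp
        rw [hp']
        have hget0 : (List.replicate 1 r ++ r :: rest').getD 0 0 = r := by simp
        rw [hget0]
        have hP : pvNbSum (List.replicate 1 m ++ r :: rest')
            = 1 + pvNb (r :: rest') + pvNbSum (r :: rest') := by
          rw [pvNbSum_replicate_cons, if_neg hm]; ring
        have hP' : pvNbSum (List.replicate 1 r ++ r :: rest')
            = pvNb (r :: rest') + pvNbSum (r :: rest') := by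
          rw [pvNbSum_replicate_cons, if_pos rfl]; ring
        rw [ih 1 r (r :: rest') (ops + 1) (by omega) (by simp) ?_]
        · rw [hP, hP']; push_cast; ring
        · rw [hP']
          rw [hP] at hfuel
          simp only [List.length_cons] at *
          set N := pvNb (r :: rest')
          set S := pvNbSum (r :: rest')
          have e1 : (1 + N + S) * (1 + (rest'.length + 1))
              = (N + S) * (1 + (rest'.length + 1)) + (1 + (rest'.length + 1)) := by ring
          rw [e1] at hfuel
          generalize (N + S) * (1 + (rest'.length + 1)) = A at *
          omega
      · -- i ≥ 2: new max is still m
        obtain ⟨j, rfl⟩ : ∃ j, i = j + 2 := ⟨i - 2, by omega⟩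
        have hp' : List.replicate (j + 2 - 1) m ++ r :: r :: rest'
            = List.replicate 1 m ++ (List.replicate j m ++ r :: r :: rest') := by
          simp [List.replicate_succ]
        have hget0 : (List.replicate (j + 2 - 1) m ++ r :: r :: rest').getD 0 0 = m := by
          simp [List.replicate_succ]
        rw [hget0, hp']
        have hP : pvNbSum (List.replicate (j + 2) m ++ r :: rest')
            = (j + 2) * (1 + pvNb (r :: rest')) + pvNbSum (r :: rest') := by
          rw [pvNbSum_replicate_cons, if_neg hm]
        have hP' : pvNbSum (List.replicate 1 m ++ (List.replicate j m ++ r :: r :: rest'))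
            = (j + 1) * (1 + pvNb (r :: rest')) + pvNb (r :: rest') + pvNbSum (r :: rest') := by
          have : List.replicate 1 m ++ (List.replicate j m ++ r :: r :: rest')
              = List.replicate (j + 1) m ++ r :: r :: rest' := by
            simp [List.replicate_succ]
          rw [this, pvNbSum_replicate_cons, if_neg hm, hNb, hS]
          ring
        rw [ih 1 m (List.replicate j m ++ r :: r :: rest') (ops + 1) (by omega) (by simp) ?_]
        · rw [hP, hP']; push_cast; ring
        · rw [hP']
          rw [hP] at hfuel
          simp only [List.length_append, List.length_replicate, List.length_cons] at *
          set N := pvNb (r :: rest')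
          set S := pvNbSum (r :: rest')
          have e1 : ((j + 2) * (1 + N) + S) * (j + 2 + (rest'.length + 1))
              = ((j + 1) * (1 + N) + N + S) * (1 + (j + (rest'.length + 1 + 1)))
                + (j + rest'.length + 3) := by ring
          rw [e1] at hfuel
          generalize ((j + 1) * (1 + N) + N + S) * (1 + (j + (rest'.length + 1 + 1))) = A at *
          omega

-- descending sort = reverse of ascending sort (Int values, identity key)
theorem pvSorted_rev_eq (piles : List Int) :
    PySem.List.sorted piles (fun x => x) true = (PySem.List.sorted piles (fun x => x) false).reverse := by
  apply List.Perm.eq_of_pairwise (le := fun a b : Int => b ≤ a)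
  · exact fun a b _ _ h1 h2 => le_antisymm h2 h1
  · exact PySem.List.sorted_pairwise_rev piles (fun x => x)
  · rw [List.pairwise_reverse]
    exact PySem.List.sorted_pairwise piles (fun x => x)
  · exact (PySem.List.sorted_perm piles (fun x => x) true).trans
      ((List.reverse_perm _).trans (PySem.List.sorted_perm piles (fun x => x) false)).symm

theorem pvNb_append (l : List Int) (x : Int) :
    pvNb (l ++ [x]) = pvNb l + (match l.getLast? with | none => 0 | some c => if c = x then 0 else 1) := by
  induction l using pvNb.induct with
  | case1 => simp [pvNb]
  | case2 a => simp [pvNb]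
  | case3 a b t ih =>
    simp only [List.cons_append] at ih ⊢
    simp only [pvNb, ih, List.getLast?_cons_cons]
    omega

theorem pvNbSum_append (l : List Int) (x : Int) :
    pvNbSum (l ++ [x]) = pvNbSum l + (match l.getLast? with | none => 0 | some c => if c = x then 0 else l.length) := by
  induction l with
  | nil => simp [pvNbSum, pvNb]
  | cons a t ih =>
    simp only [List.cons_append, pvNbSum]
    rw [← List.cons_append, pvNb_append, ih]
    rcases t with _ | ⟨b, t'⟩
    · simp [pvNbSum, pvNb]
    · rw [List.getLast?_cons_cons]
      cases h : (b :: t').getLast? with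
      | none => simp at h
      | some c =>
        simp only [List.length_cons]
        split_ifs <;> omega

-- B's fold computes pvNbSum of the reversed list
theorem pvFold_eq : ∀ (t : List Int) (prev : Int) (d ops : Int),
    (List.foldl make_piles_equal_height_altStep (ops, d) ((prev :: t).zip t)).1
      = ops + (pvNbSum ((prev :: t).reverse) : Int) + d * t.length := by
  intro t
  induction t with
  | nil => intro prev d ops; simp [pvNbSum, pvNb]
  | cons c t' ih =>
    intro prev d ops
    have hrev : (prev :: c :: t').reverse = (c :: t').reverse ++ [prev] := by simp
    have hnb : pvNbSum ((prev :: c :: t').reverse)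
        = pvNbSum ((c :: t').reverse) + (if c = prev then 0 else 1) * (t'.length + 1) := by
      rw [hrev, pvNbSum_append]
      rw [List.getLast?_reverse]
      simp [List.head?]
    have hzip : (prev :: c :: t').zip (c :: t') = (prev, c) :: (c :: t').zip t' := rfl
    rw [hzip, List.foldl_cons]
    show (List.foldl make_piles_equal_height_altStep (make_piles_equal_height_altStep (ops, d) (prev, c)) ((c :: t').zip t')).1 = _
    rw [show make_piles_equal_height_altStep (ops, d) (prev, c)
        = (ops + (if c ≠ prev then d + 1 else d), (if c ≠ prev then d + 1 else d)) from rfl]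
    rw [ih]
    rw [hnb]
    by_cases h : c = prev
    · simp only [h, ne_eq, not_true_eq_false, if_false, List.length_cons]
      push_cast
      ring
    · simp only [ne_eq, h, not_false_eq_true, if_true, List.length_cons]
      push_cast
      ring

theorem make_piles_equal_height_spec' : ∀ (piles : List Int), 2 ≤ piles.length →
    make_piles_equal_height piles = make_piles_equal_height_alt piles := by
  intro piles hpre
  -- the ascending sort is nonempty: s2 = m2 :: t2
  obtain ⟨m2, t2, hs2⟩ : ∃ m2 t2, PySem.List.sorted piles (fun x => x) false = m2 :: t2 := by
    cases h : PySem.List.sorted piles (fun x => x) false with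
    | nil => rw [PySem.List.sorted_eq_nil_iff] at h; subst h; simp at hpre
    | cons a b => exact ⟨a, b, rfl⟩
  -- the descending sort is its reverse: s = m :: t, t ≠ []
  have hsrev : PySem.List.sorted piles (fun x => x) true = (m2 :: t2).reverse := by
    rw [pvSorted_rev_eq, hs2]
  obtain ⟨m, t, hs⟩ : ∃ m t, PySem.List.sorted piles (fun x => x) true = m :: t := by
    cases h : PySem.List.sorted piles (fun x => x) true with
    | nil => rw [PySem.List.sorted_eq_nil_iff] at h; subst h; simp at hpre
    | cons a b => exact ⟨a, b, rfl⟩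
  have hlen : (m :: t).length = piles.length := by
    rw [← hs, PySem.List.length_sorted]
  have ht : t ≠ [] := by
    intro h; rw [h] at hlen; simp at hlen; omega
  -- evaluate A's port
  have hA : make_piles_equal_height piles = (pvNbSum (m :: t) : Int) := by
    have key : make_piles_equal_height_loop (((m :: t).length + 1) ^ 3) (m :: t) m 1 0
        = (pvNbSum (m :: t) : Int) := by
      rw [show (m :: t) = List.replicate 1 m ++ t by simp]
      rw [pvLoop_eq _ 1 m t 0 (by omega) ht ?_]
      · simp
      · -- fuel bound: pvNbSum s * len + |t| < (len + 1)^3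
        have hb := pvNbSum_le (List.replicate 1 m ++ t)
        simp only [List.length_append, List.length_replicate, List.length_cons] at *
        set T := t.length with hT
        set S := pvNbSum (List.replicate 1 m ++ t) with hSd
        have hcube : (1 + T + 1) ^ 3 = (1 + T) * (1 + T) * (1 + T) + 3 * ((1 + T) * (1 + T))
            + 3 * (1 + T) + 1 := by ring
        have h1 : S * (1 + T) ≤ (1 + T) * (1 + T) * (1 + T) :=
          Nat.mul_le_mul_right _ hb
        rw [hcube]
        generalize (1 + T) * (1 + T) * (1 + T) = C at *
        generalize (1 + T) * (1 + T) = Q at *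
        generalize S * (1 + T) = P at *
        omega
    rw [make_piles_equal_height]
    simp only [hs]
    rw [show PySem.List.pyGet? (m :: t) 0 = some m by
      simp [PySem.List.pyGet?, PySem.List.pyIdx?]]
    exact key
  -- evaluate B's port
  have hB : make_piles_equal_height_alt piles = (pvNbSum ((m2 :: t2).reverse) : Int) := by
    rw [make_piles_equal_height_alt]
    simp only [hs2]
    rw [PySem.List.slice_from _ (by norm_num : (0:Int) ≤ 1)]
    have : (Int.toNat 1) = 1 := rfl
    rw [this, List.drop_one, List.tail_cons]
    have := pvFold_eq t2 m2 0 0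
    rw [this]
    simp
  rw [hA, hB, ← hsrev, hs]

-- ===== VERDICT (by name: the statement is the Claim_ definition above) =====
theorem make_piles_equal_height_spec : Claim_equal_make_piles_equal_height := by
  intro piles _ hpre
  exact make_piles_equal_height_spec' piles hpre
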